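-- pv_equiv track=rewrite | github.com/beRetana/ICSH32_Projects | Reinforcement_Sets/Set_5/problem2.py | extract_command_options
-- ===== SOURCE A (Python) =====
-- from collections import namedtuple
--
-- CommandOption = namedtuple("CommandOption", ["command_list", "level_name"])
--
-- def extract_content(start_content: str, end_content: str, lines_data: list[str])->str:
--     'Gets the lines in between a starting line and an ending line'
--
--     in_content = False
--
--     content_lines = []
--
--     for line in lines_data:
--         if end_content in line:
--             return content_lines
--         if in_content:
--             content_lines.append(line)
--             continue
--         elif start_content in line:
--             in_content = True
--             continue
--
--     return "NOT FOUND"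
--
-- def extract_command_options(lines_data: list[str])->list[CommandOption]:
--     'Extract lines for commands and returns a list with all the possible commands'
--
--     command_lines = extract_content("COMMANDS", "END COMMANDS", lines_data)
--
--     if command_lines == "NOT FOUND":
--         return "NOT FOUND"
--
--     commands_list = []
--
--     for line in command_lines:
--         commands, level_name = line.split(sep=":")
--         commands = commands.split(sep=",")
--         commands_list.append(CommandOption(commands, level_name))
--
--     return commands_list
-- ===== SOURCE B (Python) =====
-- from collections import namedtuple
--
-- CommandOption = namedtuple("CommandOption", ["command_list", "level_name"])
--
-- def extract_command_options(lines_data: list[str]) -> list[CommandOption]: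
--     'Extract lines for commands and returns a list with all the possible commands'
--     end = next((i for i, line in enumerate(lines_data) if "END COMMANDS" in line), None)
--     if end is None:
--         return "NOT FOUND"
--     start = next((i for i in range(end) if "COMMANDS" in lines_data[i]), None)
--     body = lines_data[start + 1:end] if start is not None else []
--     return [CommandOption(commands.split(","), name)
--             for commands, name in (line.split(":") for line in body)]
-- ===== Notes on version B (the rewrite author's own statement) =====
-- stated objective: simpler
-- what changed: Drops the extract_content state-machine helper: B finds the index of the first 'END COMMANDS' line, the index of the first 'COMMANDS' line before it, slices the lines between them and parses with a single comprehension.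
-- outside the precondition, e.g. on extract_command_options(['go:cave']): A returns 'NOT FOUND', B returns 'NOT FOUND'; on extract_command_options(['COMMANDS', 'badline', 'END COMMANDS']): A raises ValueError, B raises ValueError
import Mathlib
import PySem

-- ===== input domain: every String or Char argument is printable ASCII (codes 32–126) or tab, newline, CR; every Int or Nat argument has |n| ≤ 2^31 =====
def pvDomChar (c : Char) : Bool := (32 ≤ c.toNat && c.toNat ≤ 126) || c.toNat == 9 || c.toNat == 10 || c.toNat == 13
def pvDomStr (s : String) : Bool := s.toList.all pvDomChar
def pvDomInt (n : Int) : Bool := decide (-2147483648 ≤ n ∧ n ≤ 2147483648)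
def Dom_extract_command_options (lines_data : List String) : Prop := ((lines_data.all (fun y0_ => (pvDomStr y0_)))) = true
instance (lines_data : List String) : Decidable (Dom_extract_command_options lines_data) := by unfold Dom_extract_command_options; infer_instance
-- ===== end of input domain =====

-- B replaces A's extract_content state-machine helper by direct index computation
-- (find the end marker, find the start marker before it, slice, map-parse); objective: simpler.


-- ===== PORT A =====
-- extract_content's loop: state = (in_content, content_lines); returns none for "NOT FOUND"
def pvEcLoop (start_content end_content : String) (lines : List String) (in_content : Bool)
    (content_lines : List String) : Option (List String) :=
  match lines with
  | [] => none
  | line :: rest =>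
    if PySem.Str.isIn end_content line then some content_lines
    else if in_content then pvEcLoop start_content end_content rest in_content (content_lines ++ [line])
    else if PySem.Str.isIn start_content line then pvEcLoop start_content end_content rest true content_lines
    else pvEcLoop start_content end_content rest in_content content_lines

-- commands, level_name = line.split(":"); other arities raise ValueError (excluded by Pre_)
-- split? is some since the separators are non-empty; two-way unpack, other arities raise ValueError (outside Pre_)
def pvParseLineA (line : String) : List String × String :=
  match PySem.Str.split? line ":" with
  | some [commands, level_name] => ((PySem.Str.split? commands ",").getD [], level_name)
  | _ => ([], "")

def extract_command_options (lines_data : List String) : List (List String × String) :=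
  match pvEcLoop "COMMANDS" "END COMMANDS" lines_data false [] with
  | none => []  -- Python A returns the string "NOT FOUND" here (not a list); outside Pre_
  | some command_lines =>
      command_lines.foldl (fun commands_list line => commands_list ++ [pvParseLineA line]) []

-- ===== PORT B =====
def extract_command_options_alt (lines_data : List String) : List (List String × String) :=
  match lines_data.findIdx? (fun line => PySem.Str.isIn "END COMMANDS" line) with
  | none => []  -- Python B returns the string "NOT FOUND" here (not a list); outside Pre_
  | some e =>
    let body : List String :=
      match (lines_data.take e).findIdx? (fun line => PySem.Str.isIn "COMMANDS" line) with
      | none => []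
      | some s => (lines_data.take e).drop (s + 1)
    body.map (fun line =>
      match PySem.Str.split? line ":" with
      | some [commands, name] => ((PySem.Str.split? commands ",").getD [], name)
      | _ => ([], ""))

-- ===== PRECONDITION & SPEC =====
-- the lines A parses: everything strictly between the first "COMMANDS" line and the first "END COMMANDS" line
def pvCmdBody (lines_data : List String) : List String :=
  (((lines_data.takeWhile (fun l => !PySem.Str.isIn "END COMMANDS" l)).dropWhile
      (fun l => !PySem.Str.isIn "COMMANDS" l)).drop 1)

-- Pre_ excludes inputs with no line containing "END COMMANDS", on which A returns the string "NOT FOUND"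
-- instead of a list of pairs, and inputs whose body lines do not contain exactly one colon character,
-- on which A raises ValueError while unpacking the two-way split.
def Pre_extract_command_options (lines_data : List String) : Prop :=
  (lines_data.any (fun l => PySem.Str.isIn "END COMMANDS" l)) = true ∧
  ∀ l ∈ pvCmdBody lines_data, PySem.Str.count l ":" = 1

instance (lines_data : List String) : Decidable (Pre_extract_command_options lines_data) := by
  unfold Pre_extract_command_options; infer_instance

def pvWitness_extract_command_options : List String :=
  ["COMMANDS", "go,north:cave", "look:cave", "END COMMANDS"]

def Spec_extract_command_options (lines_data : List String) (out : List (List String × String)) : Prop := out = extract_command_options_alt lines_data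
instance (lines_data : List String) (out : List (List String × String)) : Decidable (Spec_extract_command_options lines_data out) := by unfold Spec_extract_command_options; infer_instance

-- ===== CLAIM (what is proved, stated in full; the proofs are below) =====
def Claim_equal_extract_command_options : Prop := ∀ (lines_data : List String), Dom_extract_command_options lines_data → Pre_extract_command_options lines_data → Spec_extract_command_options lines_data (extract_command_options lines_data)

-- ===== LEMMAS AND PROOFS =====

-- once in_content, A keeps appending until the first end-marker line
theorem pvEcLoop_true (sc ec : String) (lines : List String) (acc : List String) :
    pvEcLoop sc ec lines true acc =
      if lines.any (fun l => PySem.Str.isIn ec l) then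
        some (acc ++ lines.takeWhile (fun l => !PySem.Str.isIn ec l))
      else none := by
  induction lines generalizing acc with
  | nil => simp [pvEcLoop]
  | cons l rest ih =>
    by_cases h : PySem.Chars.isIn ec.toList l.toList = true
    · simp [pvEcLoop, h]
    · simp [pvEcLoop, h, ih]

-- before in_content, A skips until the first start-marker line (or ends at the end marker)
theorem pvEcLoop_false (sc ec : String) (lines : List String) (acc : List String) :
    pvEcLoop sc ec lines false acc =
      if lines.any (fun l => PySem.Str.isIn ec l) then
        some (acc ++
          (((lines.takeWhile (fun l => !PySem.Str.isIn ec l)).dropWhile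
              (fun l => !PySem.Str.isIn sc l)).drop 1))
      else none := by
  induction lines generalizing acc with
  | nil => simp [pvEcLoop]
  | cons l rest ih =>
    by_cases he : PySem.Chars.isIn ec.toList l.toList = true
    · simp [pvEcLoop, he]
    · by_cases hs : PySem.Chars.isIn sc.toList l.toList = true
      · simp [pvEcLoop, he, hs, pvEcLoop_true]
      · simp [pvEcLoop, he, hs, ih]

theorem pv_take_findIdx {α : Type} (p : α → Bool) (l : List α) (e : Nat)
    (h : l.findIdx? p = some e) : l.take e = l.takeWhile (fun x => !p x) := by
  induction l generalizing e with
  | nil => simp at h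
  | cons a t ih =>
    by_cases ha : p a = true
    · simp [List.findIdx?_cons, ha] at h
      subst h; simp [ha]
    · simp [List.findIdx?_cons, ha] at h
      obtain ⟨e', he', rfl⟩ := h
      simp [ha, ih e' he']

theorem pv_drop_findIdx {α : Type} (p : α → Bool) (l : List α) :
    (match l.findIdx? p with
     | none => ([] : List α)
     | some s => l.drop (s + 1)) = (l.dropWhile (fun x => !p x)).drop 1 := by
  induction l with
  | nil => simp
  | cons a t ih =>
    by_cases ha : p a = true
    · simp [List.findIdx?_cons, ha]
    · rw [List.findIdx?_cons]
      simp only [ha, if_false]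
      cases h : t.findIdx? p with
      | none =>
        have hall : ∀ x ∈ t, p x = false := by simpa [List.findIdx?_eq_none_iff] using h
        have : t.dropWhile (fun x => !p x) = [] := by
          rw [List.dropWhile_eq_nil_iff]
          intro x hx; simp [hall x hx]
        simp [ha, this]
      | some s =>
        have := ih
        rw [h] at this
        simpa [ha] using this

theorem pv_any_of_findIdx {α : Type} (p : α → Bool) (l : List α) (e : Nat)
    (h : l.findIdx? p = some e) : l.any p = true := by
  by_contra hc
  have : ∀ x ∈ l, p x = false := by
    intro x hx
    by_contra hpx
    exact hc (List.any_eq_true.mpr ⟨x, hx, by simpa using hpx⟩)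
  rw [List.findIdx?_eq_none_iff.mpr this] at h
  simp at h

-- ===== VERDICT (by name: the statement is the Claim_ definition above) =====
theorem extract_command_options_spec : Claim_equal_extract_command_options := by
  intro lines_data _ hpre
  unfold Spec_extract_command_options extract_command_options extract_command_options_alt
  rw [pvEcLoop_false]
  cases hf : lines_data.findIdx? (fun line => PySem.Str.isIn "END COMMANDS" line) with
  | none =>
    rcases hpre with ⟨hany, _⟩
    have : ∀ x ∈ lines_data, PySem.Str.isIn "END COMMANDS" x = false := by
      simpa [List.findIdx?_eq_none_iff] using hf
    rw [List.any_eq_true] at hany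
    obtain ⟨x, hx, hpx⟩ := hany
    rw [this x hx] at hpx
    exact absurd hpx (by simp)
  | some e =>
    have hany := pv_any_of_findIdx _ _ _ hf
    rw [if_pos hany]
    simp only
    rw [PySem.List.foldl_append_singleton_eq_map, List.nil_append,
        pv_take_findIdx _ _ _ hf, pv_drop_findIdx]
    rfl
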